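-- pv_equiv track=rewrite | github.com/jg1970jg/Tribunal-SaaS | src/pipeline/schema_unified.py | calculate_chunks_for_document
-- ===== SOURCE A (Python) =====
-- def calculate_chunks_for_document(
--     total_chars: int,
--     chunk_size: int = 50000,
--     overlap: int = 2500
-- ) -> list[tuple[int, int]]:
--     """
--     Calcula os intervalos de chunks para um documento.
--
--     Args:
--         total_chars: Total de caracteres do documento
--         chunk_size: Tamanho de cada chunk
--         overlap: Sobreposição entre chunks
--
--     Returns:
--         Lista de tuplas (start_char, end_char)
--     """
--     if total_chars <= chunk_size:
--         return [(0, total_chars)]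
--
--     step = chunk_size - overlap  # 47500 com defaults
--     chunks = []
--     start = 0
--
--     while start < total_chars:
--         end = min(start + chunk_size, total_chars)
--         chunks.append((start, end))
--
--         if end >= total_chars:
--             break
--
--         start += step
--
--     return chunks
-- ===== SOURCE B (Python) =====
-- def calculate_chunks_for_document(
--     total_chars: int,
--     chunk_size: int = 50000,
--     overlap: int = 2500
-- ) -> list[tuple[int, int]]:
--     """Compute overlapping chunk intervals via a closed-form chunk count."""
--     if total_chars <= chunk_size:
--         return [(0, total_chars)]
--
--     step = chunk_size - overlap
--     num_chunks = 1 + -(-(total_chars - chunk_size) // step)  # ceiling division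
--     return [(i * step, min(i * step + chunk_size, total_chars))
--             for i in range(num_chunks)]
-- ===== Notes on version B (the rewrite author's own statement) =====
-- stated objective: alternative
-- what changed: Replaces the running start/early-break while loop with a closed-form ceiling computation of the chunk count feeding a single range comprehension; Pre_ restricts to the natural domain 0 <= overlap < chunk_size once the document exceeds one chunk: with overlap >= chunk_size A loops forever, and a negative overlap means gaps rather than overlaps, a corner outside the parameter's meaning where whether a trailing partial chunk is emitted is anybody's choice and A and B choose differently.
-- outside the precondition, e.g. on calculate_chunks_for_document(10, 1, -7): A returns [(0, 1), (8, 9)], B returns [(0, 1), (8, 9), (16, 10)]; on calculate_chunks_for_document(10, 3, -5): A returns [(0, 3), (8, 10)], B returns [(0, 3), (8, 10)]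
import Mathlib
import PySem

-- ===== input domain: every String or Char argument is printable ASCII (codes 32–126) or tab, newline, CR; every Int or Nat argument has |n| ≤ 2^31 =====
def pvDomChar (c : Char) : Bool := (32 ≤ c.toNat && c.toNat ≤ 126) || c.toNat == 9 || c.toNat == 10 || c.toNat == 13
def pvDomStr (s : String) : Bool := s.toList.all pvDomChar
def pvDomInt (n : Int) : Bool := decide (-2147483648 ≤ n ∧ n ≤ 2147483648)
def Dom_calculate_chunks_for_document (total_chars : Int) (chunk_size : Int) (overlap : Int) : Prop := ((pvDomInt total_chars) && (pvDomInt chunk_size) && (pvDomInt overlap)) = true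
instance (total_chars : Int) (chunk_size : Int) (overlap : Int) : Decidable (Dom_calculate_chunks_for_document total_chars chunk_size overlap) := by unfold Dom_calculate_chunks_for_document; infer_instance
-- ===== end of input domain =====

-- B computes the chunk count up front by ceiling division and emits the intervals with one
-- range comprehension, instead of A's running-start while loop with an early break.
-- Pre_ restricts to the natural domain 0 <= overlap < chunk_size once the document exceeds one
-- chunk: with overlap >= chunk_size A loops forever, and a negative overlap means gaps rather
-- than overlaps, a corner where either choice about a trailing partial chunk is defensible.


-- ===== PORT A =====
-- the while loop, with fuel total_chars.toNat + 1 (enough whenever step ≥ 1, the only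
-- case Pre_ admits in which the loop body runs more than once)
def pvALoop (total_chars chunk_size step : Int) : Nat → Int → List (Int × Int) → List (Int × Int)
  | 0, _, acc => acc.reverse
  | n + 1, start, acc =>
    if start < total_chars then
      let e := min (start + chunk_size) total_chars
      let acc' := (start, e) :: acc
      if total_chars ≤ e then acc'.reverse
      else pvALoop total_chars chunk_size step n (start + step) acc'
    else acc.reverse

def calculate_chunks_for_document (total_chars : Int) (chunk_size : Int) (overlap : Int) : List (Int × Int) :=
  if total_chars ≤ chunk_size then [(0, total_chars)]
  else pvALoop total_chars chunk_size (chunk_size - overlap) (total_chars.toNat + 1) 0 []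

-- ===== PORT B =====
-- ceiling division: -((-a) // b)
def pvCeilDiv (a b : Int) : Int := -(PySem.Int.floordiv (-a) b)

def calculate_chunks_for_document_alt (total_chars : Int) (chunk_size : Int) (overlap : Int) : List (Int × Int) :=
  if total_chars ≤ chunk_size then [(0, total_chars)]
  else
    let step := chunk_size - overlap
    let num_chunks := 1 + pvCeilDiv (total_chars - chunk_size) step
    (PySem.List.pyRange 0 num_chunks 1).map (fun i => (i * step, min (i * step + chunk_size) total_chars))

-- ===== PRECONDITION & SPEC =====
-- Pre_ restricts to the natural domain 0 ≤ overlap < chunk_size when total_chars > chunk_size: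
-- with overlap ≥ chunk_size A loops forever, and a negative overlap means gaps rather than
-- overlaps, a corner where A and B defensibly differ on a trailing partial chunk.
def Pre_calculate_chunks_for_document (total_chars : Int) (chunk_size : Int) (overlap : Int) : Prop :=
  total_chars ≤ chunk_size ∨ (0 ≤ overlap ∧ overlap < chunk_size)
instance (total_chars : Int) (chunk_size : Int) (overlap : Int) : Decidable (Pre_calculate_chunks_for_document total_chars chunk_size overlap) := by unfold Pre_calculate_chunks_for_document; infer_instance

def pvWitness_calculate_chunks_for_document : Int × Int × Int := (10, 4, 1)

def Spec_calculate_chunks_for_document (total_chars : Int) (chunk_size : Int) (overlap : Int) (out : List (Int × Int)) : Prop := out = calculate_chunks_for_document_alt total_chars chunk_size overlap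
instance (total_chars : Int) (chunk_size : Int) (overlap : Int) (out : List (Int × Int)) : Decidable (Spec_calculate_chunks_for_document total_chars chunk_size overlap out) := by unfold Spec_calculate_chunks_for_document; infer_instance

-- ===== CLAIM =====
def Claim_equal_calculate_chunks_for_document : Prop := ∀ (total_chars : Int) (chunk_size : Int) (overlap : Int), Dom_calculate_chunks_for_document total_chars chunk_size overlap → Pre_calculate_chunks_for_document total_chars chunk_size overlap → Spec_calculate_chunks_for_document total_chars chunk_size overlap (calculate_chunks_for_document total_chars chunk_size overlap)

-- ===== LEMMAS AND PROOFS =====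

-- ceiling-division bracket: (c-1)*s < a ≤ c*s
theorem pvCeilDiv_spec (a s : Int) (hs : 0 < s) :
    (pvCeilDiv a s - 1) * s < a ∧ a ≤ pvCeilDiv a s * s := by
  have h := (PySem.Int.neg_floordiv_neg_eq_iff_of_pos (a := a) (b := s) (q := pvCeilDiv a s) hs).mp rfl
  exact h

-- the loop from start = j*step produces the chunks for indices j..last, where last is
-- bracketed as the first index whose chunk reaches total_chars and still starts inside it
theorem pvALoop_eq (total_chars chunk_size step : Int) (hs : 1 ≤ step) (last : Int)
    (hbr1 : (last - 1) * step < total_chars - chunk_size)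
    (hbr2 : total_chars - chunk_size ≤ last * step)
    (hguard : last * step < total_chars) :
    ∀ (n : Nat) (j : Int) (acc : List (Int × Int)), 0 ≤ j → j ≤ last →
      (total_chars - j * step).toNat < n →
      pvALoop total_chars chunk_size step n (j * step) acc =
        acc.reverse ++ (PySem.List.pyRange j (last + 1) 1).map
          (fun i => (i * step, min (i * step + chunk_size) total_chars)) := by
  intro n
  induction n with
  | zero => intro j acc _ _ h; omega
  | succ n ih =>
    intro j acc hj0 hjlast hfuel
    have hjs : j * step < total_chars := by
      have : j * step ≤ last * step := mul_le_mul_of_nonneg_right hjlast (by omega)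
      omega
    rw [pvALoop]
    simp only [if_pos hjs]
    by_cases hbrk : total_chars ≤ min (j * step + chunk_size) total_chars
    · -- break: this is the last chunk, so j = last
      have hge : total_chars - chunk_size ≤ j * step := by omega
      have hjeq : j = last := by
        by_contra hc
        have hjl : j ≤ last - 1 := by omega
        have : j * step ≤ (last - 1) * step := mul_le_mul_of_nonneg_right hjl (by omega)
        omega
      rw [if_pos hbrk, hjeq, PySem.List.pyRange_one_singleton last]
      simp
    · rw [if_neg hbrk]
      have hlt2 : j * step < total_chars - chunk_size := by omega
      have hjlt : j < last := by
        by_contra hc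
        have hje : j = last := by omega
        rw [hje] at hlt2
        omega
      have hcons : PySem.List.pyRange j (last + 1) 1 = j :: PySem.List.pyRange (j + 1) (last + 1) 1 :=
        PySem.List.pyRange_one_cons (by omega)
      have hstep : j * step + step = (j + 1) * step := by ring
      have hfuel2 : (total_chars - (j + 1) * step).toNat < n := by
        have h1 : (j + 1) * step = j * step + step := by ring
        omega
      rw [hstep, ih (j + 1) _ (by omega) (by omega) hfuel2]
      rw [hcons]
      simp

theorem calculate_chunks_for_document_eq (total_chars chunk_size overlap : Int)
    (hpre : Pre_calculate_chunks_for_document total_chars chunk_size overlap) :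
    calculate_chunks_for_document total_chars chunk_size overlap =
      calculate_chunks_for_document_alt total_chars chunk_size overlap := by
  unfold calculate_chunks_for_document calculate_chunks_for_document_alt
  by_cases hle : total_chars ≤ chunk_size
  · simp [hle]
  · rw [if_neg hle, if_neg hle]
    obtain ⟨hov0, hovcs⟩ : 0 ≤ overlap ∧ overlap < chunk_size := by
      rcases hpre with h | h
      · omega
      · exact h
    have hs : 1 ≤ chunk_size - overlap := by omega
    set step := chunk_size - overlap with hstepdef
    set last := pvCeilDiv (total_chars - chunk_size) step with hlastdef
    have hm := pvCeilDiv_spec (total_chars - chunk_size) step (by omega)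
    rw [← hlastdef] at hm
    have hguard : last * step < total_chars := by
      have h1 : last * step = (last - 1) * step + step := by ring
      omega
    have hge0 : (0 : Int) ≤ last := by
      by_contra hc
      rw [not_le] at hc
      have : last * step ≤ 0 * step := mul_le_mul_of_nonneg_right (by omega) (by omega)
      omega
    have h0 := pvALoop_eq total_chars chunk_size step hs last hm.1 hm.2 hguard
      (total_chars.toNat + 1) 0 [] le_rfl hge0 (by omega)
    rw [zero_mul] at h0
    rw [h0]
    simp only [List.reverse_nil, List.nil_append]
    have : (1 : Int) + last = last + 1 := by ring
    rw [this]

-- ===== VERDICT =====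
theorem calculate_chunks_for_document_spec : Claim_equal_calculate_chunks_for_document := by
  intro total_chars chunk_size overlap _ hpre
  unfold Spec_calculate_chunks_for_document
  exact calculate_chunks_for_document_eq total_chars chunk_size overlap hpre
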